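-- pv_equiv track=rewrite | github.com/HashNuke/wakewords | tests/test_augment_mix_equivalence.py | _sample_mismatch_message
-- ===== SOURCE A (Python) =====
-- def _sample_mismatch_message(expected: list[int], actual: list[int]) -> str:
--     if len(expected) != len(actual):
--         return f"Length mismatch: expected {len(expected)} samples, got {len(actual)}"
--
--     differing = [
--         (index, left, right)
--         for index, (left, right) in enumerate(zip(expected, actual, strict=True))
--         if left != right
--     ]
--     if not differing:
--         return "No mismatch"
--
--     first_index, expected_sample, actual_sample = differing[0]
--     max_delta = max(abs(left - right) for _, left, right in differing)
--     return (
--         f"Found {len(differing)} differing samples; first mismatch at index {first_index}: "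
--         f"expected {expected_sample}, got {actual_sample}; max abs delta {max_delta}"
--     )
-- ===== SOURCE B (Python) =====
-- def _sample_mismatch_message(expected: list[int], actual: list[int]) -> str:
--     if len(expected) != len(actual):
--         return f"Length mismatch: expected {len(expected)} samples, got {len(actual)}"
--
--     count = 0
--     first = None
--     max_delta = 0
--     for index, (left, right) in enumerate(zip(expected, actual)):
--         if left != right:
--             count += 1
--             if first is None:
--                 first = (index, left, right)
--             delta = abs(left - right)
--             if delta > max_delta:
--                 max_delta = delta
--
--     if count == 0:
--         return "No mismatch"
--     first_index, expected_sample, actual_sample = first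
--     return (
--         f"Found {count} differing samples; first mismatch at index {first_index}: "
--         f"expected {expected_sample}, got {actual_sample}; max abs delta {max_delta}"
--     )
-- ===== Notes on version B (the rewrite author's own statement) =====
-- stated objective: simpler
-- what changed: Replaced the materialized `differing` list (built once, then scanned again for its length, head and max delta) with a single pass over zip(expected, actual) maintaining three accumulators: count, the first mismatch record, and a running max delta.
import Mathlib
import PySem

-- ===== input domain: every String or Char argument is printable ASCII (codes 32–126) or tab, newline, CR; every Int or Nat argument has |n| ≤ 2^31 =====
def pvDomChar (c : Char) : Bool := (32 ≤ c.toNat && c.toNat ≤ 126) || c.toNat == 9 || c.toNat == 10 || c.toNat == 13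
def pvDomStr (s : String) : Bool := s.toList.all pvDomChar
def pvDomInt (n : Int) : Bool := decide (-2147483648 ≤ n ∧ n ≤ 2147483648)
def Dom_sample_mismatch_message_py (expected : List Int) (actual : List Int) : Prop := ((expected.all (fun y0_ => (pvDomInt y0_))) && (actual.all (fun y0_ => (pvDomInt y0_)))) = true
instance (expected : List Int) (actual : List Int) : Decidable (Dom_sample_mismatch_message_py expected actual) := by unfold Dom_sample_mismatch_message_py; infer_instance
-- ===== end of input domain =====

-- B replaces A's materialized `differing` list (scanned again for length, head and max delta)
-- by one pass keeping count / first-mismatch / running-max accumulators; same strings, O(1) extra space.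

-- ===== PORT A =====
def sample_mismatch_message_py (expected : List Int) (actual : List Int) : String :=
  if expected.length ≠ actual.length then
    "Length mismatch: expected " ++ PySem.Int.toStr expected.length ++ " samples, got "
      ++ PySem.Int.toStr actual.length
  else
    -- the comprehension over enumerate(zip(..)) with its filter, as a filterMap
    let differing := (PySem.List.enumerate (expected.zip actual) 0).filterMap
      (fun p => if p.2.1 ≠ p.2.2 then some (p.1, p.2.1, p.2.2) else none)
    match differing with
    | [] => "No mismatch"
    | (first_index, expected_sample, actual_sample) :: rest =>
      -- Python's max(..) over the nonempty list of deltas IS the running-max fold from the first delta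
      let maxDelta := (rest.map (fun t => |t.2.1 - t.2.2|)).foldl max |expected_sample - actual_sample|
      "Found " ++ PySem.Int.toStr (((first_index, expected_sample, actual_sample) :: rest).length)
        ++ " differing samples; first mismatch at index " ++ PySem.Int.toStr first_index
        ++ ": expected " ++ PySem.Int.toStr expected_sample
        ++ ", got " ++ PySem.Int.toStr actual_sample
        ++ "; max abs delta " ++ PySem.Int.toStr maxDelta

-- ===== PORT B =====
-- B's loop over zip with the three accumulators (index carried explicitly)
def pvBLoop : List (Int × Int) → Int → Int → Option (Int × Int × Int) → Int →
    Int × Option (Int × Int × Int) × Int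
  | [], _, count, first, maxd => (count, first, maxd)
  | (l, r) :: rest, idx, count, first, maxd =>
    if l ≠ r then
      pvBLoop rest (idx + 1) (count + 1)
        (match first with | none => some (idx, l, r) | some t => some t)
        (if |l - r| > maxd then |l - r| else maxd)
    else
      pvBLoop rest (idx + 1) count first maxd

def sample_mismatch_message_py_alt (expected : List Int) (actual : List Int) : String :=
  if expected.length ≠ actual.length then
    "Length mismatch: expected " ++ PySem.Int.toStr expected.length ++ " samples, got "
      ++ PySem.Int.toStr actual.length
  else
    match pvBLoop (expected.zip actual) 0 0 none 0 with
    | (count, first, maxd) =>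
      if count = 0 then "No mismatch"
      else
        match first with
        | some (first_index, expected_sample, actual_sample) =>
          "Found " ++ PySem.Int.toStr count
            ++ " differing samples; first mismatch at index " ++ PySem.Int.toStr first_index
            ++ ": expected " ++ PySem.Int.toStr expected_sample
            ++ ", got " ++ PySem.Int.toStr actual_sample
            ++ "; max abs delta " ++ PySem.Int.toStr maxd
        | none => ""  -- unreachable: count ≠ 0 forces a recorded first mismatch

-- ===== PRECONDITION & SPEC =====
def Spec_sample_mismatch_message_py (expected : List Int) (actual : List Int) (out : String) : Prop := out = sample_mismatch_message_py_alt expected actual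
instance (expected : List Int) (actual : List Int) (out : String) : Decidable (Spec_sample_mismatch_message_py expected actual out) := by unfold Spec_sample_mismatch_message_py; infer_instance

-- ===== CLAIM (what is proved, stated in full; the proofs are below) =====
def Claim_equal_sample_mismatch_message_py : Prop := ∀ (expected : List Int) (actual : List Int), Dom_sample_mismatch_message_py expected actual → Spec_sample_mismatch_message_py expected actual (sample_mismatch_message_py expected actual)

-- ===== LEMMAS AND PROOFS =====

-- the list of mismatch triples, indexed from `idx` (proof-side characterisation)
def pvDL : List (Int × Int) → Int → List (Int × Int × Int)
  | [], _ => []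
  | (l, r) :: rest, idx =>
    if l ≠ r then (idx, l, r) :: pvDL rest (idx + 1) else pvDL rest (idx + 1)

lemma filterMap_enumerate_eq_pvDL (ps : List (Int × Int)) (s : Int) :
    (PySem.List.enumerate ps s).filterMap
      (fun p => if p.2.1 ≠ p.2.2 then some (p.1, p.2.1, p.2.2) else none) = pvDL ps s := by
  induction ps generalizing s with
  | nil => simp [pvDL, PySem.List.enumerate_nil]
  | cons hd tl ih =>
    obtain ⟨l, r⟩ := hd
    by_cases h : l = r <;>
      simp [pvDL, PySem.List.enumerate_cons, h] <;>
      simpa using ih (s + 1)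

lemma pvBLoop_eq (ps : List (Int × Int)) : ∀ (idx count : Int)
    (first : Option (Int × Int × Int)) (maxd : Int),
    pvBLoop ps idx count first maxd =
      (count + ((pvDL ps idx).length : Int),
       (match first with | none => (pvDL ps idx).head? | some t => some t),
       (pvDL ps idx).foldl
         (fun m t => if |t.2.1 - t.2.2| > m then |t.2.1 - t.2.2| else m) maxd) := by
  induction ps with
  | nil => intro idx count first maxd; cases first <;> simp [pvBLoop, pvDL]
  | cons hd tl ih =>
    intro idx count first maxd
    obtain ⟨l, r⟩ := hd
    by_cases h : l = r
    · simp [pvBLoop, pvDL, h, ih]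
    · simp only [pvBLoop, pvDL, if_pos h, ih]
      refine Prod.ext ?_ (Prod.ext ?_ ?_)
      · simp; ring
      · cases first <;> simp
      · simp

lemma foldl_if_eq_foldl_max (rest : List (Int × Int × Int)) : ∀ (init : Int),
    rest.foldl (fun m t => if |t.2.1 - t.2.2| > m then |t.2.1 - t.2.2| else m) init
      = (rest.map (fun t => |t.2.1 - t.2.2|)).foldl max init := by
  induction rest with
  | nil => intro init; simp
  | cons hd tl ih =>
    intro init
    have : (if |hd.2.1 - hd.2.2| > init then |hd.2.1 - hd.2.2| else init)
        = max init |hd.2.1 - hd.2.2| := by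
      generalize |hd.2.1 - hd.2.2| = d
      split_ifs <;> omega
    simp [List.foldl_cons, this, ih]

-- ===== VERDICT (by name: the statement is the Claim_ definition above) =====
theorem sample_mismatch_message_py_spec : Claim_equal_sample_mismatch_message_py := by
  intro expected actual _
  unfold Spec_sample_mismatch_message_py sample_mismatch_message_py sample_mismatch_message_py_alt
  by_cases hlen : expected.length = actual.length
  · simp only [hlen, ne_eq, not_true_eq_false, if_false]
    rw [filterMap_enumerate_eq_pvDL, pvBLoop_eq]
    cases hdl : pvDL (expected.zip actual) 0 with
    | nil => simp
    | cons t rest =>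
      obtain ⟨i, l, r⟩ := t
      have hcount : (0 : Int) + (((i, l, r) :: rest).length : Int) ≠ 0 := by
        simp; omega
      simp only [hcount, List.head?_cons]
      have hmax : ((i, l, r) :: rest).foldl
          (fun m t => if |t.2.1 - t.2.2| > m then |t.2.1 - t.2.2| else m) 0
          = (rest.map (fun t => |t.2.1 - t.2.2|)).foldl max |l - r| := by
        rw [List.foldl_cons, ← foldl_if_eq_foldl_max]
        congr 1
        have h0 : (0 : Int) ≤ |l - r| := abs_nonneg _
        simp only []
        split_ifs <;> omega
      simp [hmax]
  · simp [hlen]
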